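-- pv_equiv track=rewrite | github.com/AlexLee1109/Akane | app/codebase_search.py | _iter_path_like_tokens
-- ===== SOURCE A (Python) =====
-- def _iter_path_like_tokens(text: str):
--     allowed = {"_", "-", ".", "/"}
--     current: list[str] = []
--     for ch in str(text or ""):
--         if ch.isalnum() or ch in allowed:
--             current.append(ch)
--             continue
--         if current:
--             yield "".join(current)
--             current = []
--     if current:
--         yield "".join(current)
-- ===== SOURCE B (Python) =====
-- def _iter_path_like_tokens(text: str):
--     allowed = {"_", "-", ".", "/"}
--     masked = "".join(ch if (ch.isalnum() or ch in allowed) else " " for ch in str(text or ""))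
--     yield from masked.split()
-- ===== Notes on version B (the rewrite author's own statement) =====
-- stated objective: idiomatic
-- what changed: Instead of A's single pass with a manual run accumulator and end-of-loop flush, B first masks every non-token character to a space and then delegates the run extraction entirely to str.split(); correct because token characters are never whitespace, so split()'s maximal non-space runs are exactly the maximal token runs.
import Mathlib
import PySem

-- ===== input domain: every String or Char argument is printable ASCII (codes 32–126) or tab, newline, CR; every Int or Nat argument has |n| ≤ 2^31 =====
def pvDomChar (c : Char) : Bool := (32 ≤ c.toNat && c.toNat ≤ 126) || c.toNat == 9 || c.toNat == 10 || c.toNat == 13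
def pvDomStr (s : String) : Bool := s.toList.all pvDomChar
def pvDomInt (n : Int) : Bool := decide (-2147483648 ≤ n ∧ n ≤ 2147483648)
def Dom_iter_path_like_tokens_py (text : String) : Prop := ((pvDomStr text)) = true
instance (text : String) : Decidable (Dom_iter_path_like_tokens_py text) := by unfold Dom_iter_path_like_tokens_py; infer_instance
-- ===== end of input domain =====

-- B replaces A's one-pass run accumulator with two stages: mask every non-token character to a
-- space, then let str.split() extract the runs (idiomatic); same O(n) cost. Both Pythons are
-- generators; the ports compare the full token lists.

-- ===== PORT A =====
-- ch.isalnum() or ch in {"_", "-", ".", "/"}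
def pvPredA (c : Char) : Bool :=
  PySem.Chars.isalnum c || (c == '_' || c == '-' || c == '.' || c == '/')

-- the for-loop: state = (current, yielded-so-far); final `if current: yield`
def pvGoA : List Char → List Char → List String → List String
  | [], cur, acc => if cur ≠ [] then acc ++ [String.ofList cur] else acc
  | c :: cs, cur, acc =>
    if pvPredA c then pvGoA cs (cur ++ [c]) acc
    else if cur ≠ [] then pvGoA cs [] (acc ++ [String.ofList cur])
    else pvGoA cs [] acc

-- str(text or "") is `text` itself for a str argument (a falsy str is already "")
def iter_path_like_tokens_py (text : String) : List String :=
  pvGoA text.toList [] []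

-- ===== PORT B =====
def pvPredB (c : Char) : Bool :=
  PySem.Chars.isalnum c || (c == '_' || c == '-' || c == '.' || c == '/')

-- masked = "".join(ch if pred(ch) else " " for ch in text);  yield from masked.split()
def iter_path_like_tokens_py_alt (text : String) : List String :=
  PySem.Str.split₀ (String.ofList (text.toList.map (fun c => if pvPredB c then c else ' ')))

-- ===== PRECONDITION & SPEC =====
def Spec_iter_path_like_tokens_py (text : String) (out : List String) : Prop := out = iter_path_like_tokens_py_alt text
instance (text : String) (out : List String) : Decidable (Spec_iter_path_like_tokens_py text out) := by unfold Spec_iter_path_like_tokens_py; infer_instance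

-- ===== CLAIM (what is proved, stated in full; the proofs are below) =====
def Claim_equal_iter_path_like_tokens_py : Prop := ∀ (text : String), Dom_iter_path_like_tokens_py text → Spec_iter_path_like_tokens_py text (iter_path_like_tokens_py text)

-- ===== LEMMAS AND PROOFS =====

-- common reference form: the maximal pred-runs of a char list
def pvTokL : List Char → List (List Char)
  | [] => []
  | c :: cs =>
    if pvPredA c then
      (c :: cs.takeWhile pvPredA) :: pvTokL (cs.dropWhile pvPredA)
    else pvTokL cs
  termination_by l => l.length
  decreasing_by
    · simp only [List.length_cons]
      exact Nat.lt_succ_of_le (List.length_dropWhile_le _ _)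
    · simp

-- token characters are never whitespace, so masking makes isspace = ¬pred
theorem pvIsspace_mask (c : Char) :
    PySem.Chars.isspace (if pvPredA c then c else ' ') = !pvPredA c := by
  by_cases hp : pvPredA c
  · simp only [hp, if_true, Bool.not_true]
    rcases Bool.or_eq_true_iff.mp hp with h | h
    · have h1 : 'A'.val.toNat = 65 := by decide
      have h2 : 'Z'.val.toNat = 90 := by decide
      have h3 : 'a'.val.toNat = 97 := by decide
      have h4 : 'z'.val.toNat = 122 := by decide
      have h5 : '0'.val.toNat = 48 := by decide
      have h6 : '9'.val.toNat = 57 := by decide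
      simp only [PySem.Chars.isalnum, PySem.Chars.isalpha, PySem.Chars.isdigit,
        PySem.Chars.isupper, PySem.Chars.islower, PySem.Chars.isspace, Bool.or_eq_true,
        Bool.and_eq_true, decide_eq_true_eq, Char.le_def, UInt32.le_iff_toNat_le,
        h1, h2, h3, h4, h5, h6] at *
      simp only [Bool.or_eq_false_iff, Bool.and_eq_false_iff, decide_eq_false_iff_not,
        not_le, Char.toNat] at *
      omega
    · rcases Bool.or_eq_true_iff.mp h with h | h
      · rcases Bool.or_eq_true_iff.mp h with h | h
        · rcases Bool.or_eq_true_iff.mp h with h | h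
          all_goals (rw [beq_iff_eq] at h; subst h; decide)
        · rw [beq_iff_eq] at h; subst h; decide
      · rw [beq_iff_eq] at h; subst h; decide
  · simp [hp]; decide

-- A's loop, both accumulator states, by strong induction on the remaining input
theorem pvGoA_spec : ∀ n cs, List.length cs ≤ n → ∀ acc : List String,
    (pvGoA cs [] acc = acc ++ (pvTokL cs).map String.ofList) ∧
    (∀ cur, cur ≠ [] →
      pvGoA cs cur acc =
        acc ++ String.ofList (cur ++ cs.takeWhile pvPredA) ::
          (pvTokL (cs.dropWhile pvPredA)).map String.ofList) := by
  intro n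
  induction n with
  | zero =>
    intro cs hlen acc
    have hcs : cs = [] := List.length_eq_zero_iff.mp (Nat.le_zero.mp hlen)
    subst hcs
    refine ⟨by simp [pvGoA, pvTokL], ?_⟩
    intro cur hcur
    simp [pvGoA, pvTokL, hcur]
  | succ n ih =>
    intro cs hlen acc
    match cs with
    | [] =>
      refine ⟨by simp [pvGoA, pvTokL], ?_⟩
      intro cur hcur
      simp [pvGoA, pvTokL, hcur]
    | c :: cs =>
      have hlen' : List.length cs ≤ n := by
        simpa [Nat.succ_le_succ_iff] using hlen
      constructor
      · by_cases hp : pvPredA c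
        · have h2 := (ih cs hlen' acc).2 [c] (by simp)
          simp only [pvGoA, hp, if_true, List.nil_append] at h2 ⊢
          rw [h2, pvTokL]
          simp [hp]
        · have h1 := (ih cs hlen' acc).1
          simp only [pvGoA, hp]
          rw [pvTokL]
          simpa [hp] using h1
      · intro cur hcur
        by_cases hp : pvPredA c
        · have h2 := (ih cs hlen' acc).2 (cur ++ [c]) (by simp)
          simp only [pvGoA, hp, if_true] at h2 ⊢
          rw [h2, List.takeWhile_cons_of_pos hp, List.dropWhile_cons_of_pos hp]
          simp
        · have h1 := (ih cs hlen' (acc ++ [String.ofList cur])).1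
          simp only [pvGoA, hp, hcur, ne_eq, not_false_iff, if_true]
          rw [h1, List.takeWhile_cons_of_neg hp, List.dropWhile_cons_of_neg hp]
          rw [pvTokL]
          simp [hp]

-- split₀'s worker on the masked list, both accumulator states
theorem pvGoB_spec : ∀ n cs, List.length cs ≤ n → ∀ acc : List (List Char),
    (PySem.Chars.split₀.go (cs.map (fun c => if pvPredB c then c else ' ')) [] acc
        = acc.reverse ++ pvTokL cs) ∧
    (∀ cur, cur ≠ [] →
      PySem.Chars.split₀.go (cs.map (fun c => if pvPredB c then c else ' ')) cur acc
        = acc.reverse ++ (cur.reverse ++ cs.takeWhile pvPredA) ::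
            pvTokL (cs.dropWhile pvPredA)) := by
  intro n
  induction n with
  | zero =>
    intro cs hlen acc
    have hcs : cs = [] := List.length_eq_zero_iff.mp (Nat.le_zero.mp hlen)
    subst hcs
    refine ⟨by simp [PySem.Chars.split₀.go, pvTokL], ?_⟩
    intro cur hcur
    simp [PySem.Chars.split₀.go, pvTokL, List.isEmpty_iff, hcur]
  | succ n ih =>
    intro cs hlen acc
    match cs with
    | [] =>
      refine ⟨by simp [PySem.Chars.split₀.go, pvTokL], ?_⟩
      intro cur hcur
      simp [PySem.Chars.split₀.go, pvTokL, List.isEmpty_iff, hcur]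
    | c :: cs =>
      have hlen' : List.length cs ≤ n := by
        simpa [Nat.succ_le_succ_iff] using hlen
      constructor
      · by_cases hp : pvPredA c
        · have hm : (if pvPredB c then c else ' ') = c := by
            simp [show pvPredB c = true from hp]
          have hs : PySem.Chars.isspace c = false := by
            have := pvIsspace_mask c
            rw [hp] at this; simpa using this
          have h2 := (ih cs hlen' acc).2 [c] (by simp)
          simp only [List.map_cons, PySem.Chars.split₀.go, hm, hs, Bool.false_eq_true,
            if_false] at h2 ⊢
          rw [h2, pvTokL]
          simp [hp]
        · have hm : (if pvPredB c then c else ' ') = ' ' := by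
            simp [show pvPredB c = false by simpa using hp]
          have h1 := (ih cs hlen' acc).1
          simp only [List.map_cons, PySem.Chars.split₀.go, hm,
            show PySem.Chars.isspace ' ' = true from by decide, if_true, List.isEmpty_nil]
          rw [pvTokL]
          simpa [hp] using h1
      · intro cur hcur
        by_cases hp : pvPredA c
        · have hm : (if pvPredB c then c else ' ') = c := by
            simp [show pvPredB c = true from hp]
          have hs : PySem.Chars.isspace c = false := by
            have := pvIsspace_mask c
            rw [hp] at this; simpa using this
          have h2 := (ih cs hlen' acc).2 (c :: cur) (by simp)
          simp only [List.map_cons, PySem.Chars.split₀.go, hm, hs, Bool.false_eq_true,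
            if_false] at h2 ⊢
          rw [h2, List.takeWhile_cons_of_pos hp, List.dropWhile_cons_of_pos hp]
          simp
        · have hm : (if pvPredB c then c else ' ') = ' ' := by
            simp [show pvPredB c = false by simpa using hp]
          have h1 := (ih cs hlen' (cur.reverse :: acc)).1
          simp only [List.map_cons, PySem.Chars.split₀.go, hm,
            show PySem.Chars.isspace ' ' = true from by decide, if_true,
            List.isEmpty_iff, hcur, if_false]
          rw [h1, List.takeWhile_cons_of_neg hp, List.dropWhile_cons_of_neg hp]
          rw [pvTokL]
          simp [hp]

-- ===== VERDICT (by name: the statement is the Claim_ definition above) =====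
theorem iter_path_like_tokens_py_spec : Claim_equal_iter_path_like_tokens_py := by
  intro text _
  show iter_path_like_tokens_py text = iter_path_like_tokens_py_alt text
  unfold iter_path_like_tokens_py iter_path_like_tokens_py_alt
  rw [(pvGoA_spec text.toList.length text.toList le_rfl []).1]
  unfold PySem.Str.split₀ PySem.Chars.split₀
  rw [show (String.ofList (text.toList.map (fun c => if pvPredB c then c else ' '))).toList
      = text.toList.map (fun c => if pvPredB c then c else ' ') from by simp]
  rw [(pvGoB_spec text.toList.length text.toList le_rfl []).1]
  simp
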